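-- pv_equiv track=rewrite | github.com/atamalakrah/Advent-of-Code-2023 | Day 11/part_2.py | get_horizontal_expansions
-- ===== SOURCE A (Python) =====
-- def get_horizontal_expansions(universe):
--     amount = 0
--     for x in range(len(universe[0])):
--         for y in range(len(universe)):
--             if universe[y][x] == '#':
--                 break
--         else:
--             amount += 1
--         yield amount
-- ===== SOURCE B (Python) =====
-- def get_horizontal_expansions(universe):
--     # Stage 1: one row-major pass collects the set of column indices holding a '#'.
--     # Stage 2: a 0/1 flag per column (1 = empty column).
--     # Stage 3: prefix sums of the flags, yielded in order.
--     width = len(universe[0])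
--     nonempty = {x for row in universe for x, cell in enumerate(row[:width]) if cell == '#'}
--     flags = [0 if x in nonempty else 1 for x in range(width)]
--     prefix = []
--     total = 0
--     for f in flags:
--         total += f
--         prefix.append(total)
--     yield from prefix
-- ===== Notes on version B (the rewrite author's own statement) =====
-- stated objective: faster
-- what changed: A rescans the whole column (nested loop with break/else) for every x, accumulating while yielding; B stages the work: one row-major pass builds the set of nonempty columns, then a 0/1 flag list per column, then a separate prefix-sum pass produces the outputs.
import Mathlib
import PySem

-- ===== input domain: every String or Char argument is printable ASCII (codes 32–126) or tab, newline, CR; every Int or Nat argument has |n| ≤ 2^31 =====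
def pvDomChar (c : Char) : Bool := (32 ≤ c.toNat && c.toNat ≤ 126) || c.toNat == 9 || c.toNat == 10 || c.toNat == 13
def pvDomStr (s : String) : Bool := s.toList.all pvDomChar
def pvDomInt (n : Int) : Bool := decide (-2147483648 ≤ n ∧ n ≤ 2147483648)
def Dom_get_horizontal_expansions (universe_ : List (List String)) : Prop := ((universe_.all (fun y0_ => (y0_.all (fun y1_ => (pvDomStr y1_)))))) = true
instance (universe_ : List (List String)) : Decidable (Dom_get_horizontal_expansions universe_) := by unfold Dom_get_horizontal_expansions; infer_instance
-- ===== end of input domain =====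

-- B replaces A's per-column rescan plus yield-while-accumulating by three staged passes:
-- a set of nonempty columns, a 0/1 flag per column, and a prefix-sum scan (objective: faster, constant factor; confirmed).

-- ===== PORT A =====
-- inner 'for y in range(len(universe))' loop: returns true iff 'break' was hit ('#' found);
-- 'none' from pyGet? is Python's IndexError — unreachable inside Pre_.
def pvColBreaksA (rows : List (List String)) (x : Int) : Bool :=
  match rows with
  | [] => false
  | r :: rs =>
    match PySem.List.pyGet? r x with
    | some c => if c == "#" then true else pvColBreaksA rs x
    | none => true

def get_horizontal_expansions (universe_ : List (List String)) : List Int :=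
  let width := ((PySem.List.pyGet? universe_ 0).getD []).length
  ((List.range width).foldl (fun (st : Int × List Int) (x : Nat) =>
      let amount := if pvColBreaksA universe_ (x : Int) then st.1 else st.1 + 1
      (amount, st.2 ++ [amount])) ((0 : Int), ([] : List Int))).2

-- ===== PORT B =====
-- first pass of Source B: the set of column indices x with some row's cell (within width) equal to '#'
def pvNonemptyCols (rows : List (List String)) (width : Nat) : PySem.Set Int :=
  rows.foldl (fun s r =>
    (PySem.List.enumerate (r.take width) 0).foldl
      (fun s p => if p.2 == "#" then PySem.Set.add s p.1 else s) s)
    PySem.Set.empty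

-- third pass of Source B: running prefix sums carried through structural recursion
def pvPrefixSums (total : Int) : List Int → List Int
  | [] => []
  | f :: fs => (total + f) :: pvPrefixSums (total + f) fs

def get_horizontal_expansions_alt (universe_ : List (List String)) : List Int :=
  let width := ((PySem.List.pyGet? universe_ 0).getD []).length
  let ne := pvNonemptyCols universe_ width
  let flags := (List.range width).map
    (fun (x : Nat) => if PySem.Set.contains ne (x : Int) then (0 : Int) else 1)
  pvPrefixSums 0 flags

-- ===== PRECONDITION & SPEC =====
-- Pre_ excludes exactly the inputs on which A raises IndexError: the empty grid (universe[0]),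
-- and ragged grids where, for some column x < width, a row shorter than x+1 is reached before any
-- row carrying '#' at x (A's column scan then indexes past that row's end).
def Pre_get_horizontal_expansions (universe_ : List (List String)) : Prop :=
  universe_ ≠ [] ∧
    ∀ x < ((PySem.List.pyGet? universe_ 0).getD []).length,
      ∀ i < universe_.length, (universe_.getD i []).length ≤ x →
        ∃ j < i, (universe_.getD j [])[x]? = some "#"
instance (universe_ : List (List String)) : Decidable (Pre_get_horizontal_expansions universe_) := by
  unfold Pre_get_horizontal_expansions; infer_instance

def pvWitness_get_horizontal_expansions : List (List String) := [["#", "."], [".", "."]]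

def Spec_get_horizontal_expansions (universe_ : List (List String)) (out : List Int) : Prop := out = get_horizontal_expansions_alt universe_
instance (universe_ : List (List String)) (out : List Int) : Decidable (Spec_get_horizontal_expansions universe_ out) := by unfold Spec_get_horizontal_expansions; infer_instance

-- ===== CLAIM (what is proved, stated in full; the proofs are below) =====
def Claim_equal_get_horizontal_expansions : Prop := ∀ (universe_ : List (List String)), Dom_get_horizontal_expansions universe_ → Pre_get_horizontal_expansions universe_ → Spec_get_horizontal_expansions universe_ (get_horizontal_expansions universe_)

-- ===== LEMMAS AND PROOFS =====

-- membership in Source B's inner fold over one enumerated row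
theorem mem_innerFold (l : List (Int × String)) (s : PySem.Set Int) (x : Int) :
    (x ∈ l.foldl (fun s p => if p.2 == "#" then PySem.Set.add s p.1 else s) s) ↔
      x ∈ s ∨ ∃ p ∈ l, p.2 = "#" ∧ p.1 = x := by
  induction l generalizing s with
  | nil => simp
  | cons p l ih =>
    simp only [List.foldl_cons, ih, List.mem_cons]
    by_cases hp : p.2 = "#"
    · simp only [hp, BEq.rfl, if_true, PySem.Set.mem_add]
      constructor
      · rintro ((h | rfl) | ⟨q, hq, hv⟩)
        · exact Or.inl h
        · exact Or.inr ⟨p, Or.inl rfl, hp, rfl⟩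
        · exact Or.inr ⟨q, Or.inr hq, hv⟩
      · rintro (h | ⟨q, (rfl | hq), hv, rfl⟩)
        · exact Or.inl (Or.inl h)
        · exact Or.inl (Or.inr rfl)
        · exact Or.inr ⟨q, hq, hv, rfl⟩
    · have hpb : (p.2 == "#") = false := by simp [hp]
      simp only [hpb, Bool.false_eq_true, if_false]
      constructor
      · rintro (h | ⟨q, hq, hv⟩)
        · exact Or.inl h
        · exact Or.inr ⟨q, Or.inr hq, hv⟩
      · rintro (h | ⟨q, (rfl | hq), hv, rfl⟩)
        · exact Or.inl h
        · exact absurd hv hp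
        · exact Or.inr ⟨q, hq, hv, rfl⟩

-- membership in Source B's nonempty-column set
theorem mem_pvNonemptyCols (rows : List (List String)) (width : Nat) (x : Int) :
    x ∈ pvNonemptyCols rows width ↔
      ∃ r ∈ rows, ∃ p ∈ PySem.List.enumerate (r.take width) 0, p.2 = "#" ∧ p.1 = x := by
  have key : ∀ (rs : List (List String)) (s : PySem.Set Int),
      (x ∈ rs.foldl (fun s r =>
        (PySem.List.enumerate (r.take width) 0).foldl
          (fun s p => if p.2 == "#" then PySem.Set.add s p.1 else s) s) s) ↔
      x ∈ s ∨ ∃ r ∈ rs, ∃ p ∈ PySem.List.enumerate (r.take width) 0, p.2 = "#" ∧ p.1 = x := by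
    intro rs
    induction rs with
    | nil => simp
    | cons r rs ih =>
      intro s
      simp only [List.foldl_cons, ih, mem_innerFold, List.mem_cons]
      constructor
      · rintro ((h | ⟨p, hp, hv⟩) | ⟨r', hr', hrest⟩)
        · exact Or.inl h
        · exact Or.inr ⟨r, Or.inl rfl, p, hp, hv⟩
        · exact Or.inr ⟨r', Or.inr hr', hrest⟩
      · rintro (h | ⟨r', (rfl | hr'), hrest⟩)
        · exact Or.inl (Or.inl h)
        · exact Or.inl (Or.inr hrest)
        · exact Or.inr ⟨r', hr', hrest⟩
  simpa [pvNonemptyCols, PySem.Set.empty] using key rows PySem.Set.empty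

-- A's column scan, on a column where it does not raise, hits 'break' iff some row has '#' at x
theorem pvColBreaksA_iff_ragged (rows : List (List String)) (x : Nat)
    (H : ∀ i < rows.length, (rows.getD i []).length ≤ x →
          ∃ j < i, (rows.getD j [])[x]? = some "#") :
    pvColBreaksA rows (x : Int) = true ↔ ∃ r ∈ rows, r[x]? = some "#" := by
  induction rows with
  | nil => simp [pvColBreaksA]
  | cons r rs ih =>
    have hx : x < r.length := by
      by_contra hge
      rcases H 0 (by simp) (by simpa using Nat.le_of_not_lt hge) with ⟨j, hj, _⟩
      omega
    have hget : PySem.List.pyGet? r (x : Int) = some r[x] := by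
      simp [PySem.List.pyGet?_natCast, List.getElem?_eq_getElem hx]
    rw [show pvColBreaksA (r :: rs) (x : Int)
          = (match PySem.List.pyGet? r (x : Int) with
             | some c => if c == "#" then true else pvColBreaksA rs (x : Int)
             | none => true) from rfl, hget]
    by_cases hc : r[x] = "#"
    · simp [hc, List.getElem?_eq_getElem hx]
    · have hcb : (r[x] == "#") = false := by simp [hc]
      have H' : ∀ i < rs.length, (rs.getD i []).length ≤ x →
          ∃ j < i, (rs.getD j [])[x]? = some "#" := by
        intro i hi hshort
        rcases H (i + 1) (by simpa using Nat.succ_lt_succ hi)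
            (by simpa using hshort) with ⟨j, hj, hv⟩
        match j with
        | 0 =>
          exfalso
          rw [List.getD_cons_zero, List.getElem?_eq_getElem hx] at hv
          exact hc (Option.some.inj hv)
        | j + 1 =>
          exact ⟨j, by omega, by simpa using hv⟩
      simp only [hcb, Bool.false_eq_true, if_false, ih H', List.mem_cons]
      constructor
      · rintro ⟨r', hr', hv⟩; exact ⟨r', Or.inr hr', hv⟩
      · rintro ⟨r', (rfl | hr'), hv⟩
        · exact absurd hv (by simp [List.getElem?_eq_getElem hx, hc])
        · exact ⟨r', hr', hv⟩

-- Source B's set membership at a column x < width, with no length assumptions on the rows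
theorem contains_iff (rows : List (List String)) (width x : Nat) (hx : x < width) :
    PySem.Set.contains (pvNonemptyCols rows width) (x : Int) = true ↔
      ∃ r ∈ rows, r[x]? = some "#" := by
  rw [show (PySem.Set.contains (pvNonemptyCols rows width) (x : Int) = true) ↔
      ((x : Int) ∈ pvNonemptyCols rows width) by simp [PySem.Set.contains]]
  rw [mem_pvNonemptyCols]
  constructor
  · rintro ⟨r, hr, p, hp, hsh, hpx⟩
    rcases (PySem.List.mem_enumerate_iff _ _ _).1 hp with ⟨k, hk, rfl⟩
    have hkr : k < r.length := by
      have := hk; simp only [List.length_take] at this; omega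
    have hkx : k = x := by
      have : ((0 : Int) + (k : Int)) = (x : Int) := hpx
      omega
    subst hkx
    refine ⟨r, hr, ?_⟩
    rw [List.getElem?_eq_getElem hkr]
    have htake : (r.take width)[k] = r[k] := List.getElem_take
    simp only at hsh
    rw [← htake, hsh]
  · rintro ⟨r, hr, hsome⟩
    have hxr : x < r.length := (List.getElem?_eq_some_iff.1 hsome).1
    have hval : r[x] = "#" := by
      rw [List.getElem?_eq_getElem hxr] at hsome
      exact Option.some.inj hsome
    have hxt : x < (r.take width).length := by
      simp only [List.length_take]; omega
    refine ⟨r, hr, ((0 : Int) + (x : Nat), (r.take width)[x]),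
      (PySem.List.mem_enumerate_iff _ _ _).2 ⟨x, hxt, rfl⟩, ?_, by simp⟩
    simpa [List.getElem_take] using hval

-- inside Pre_, the two column-emptiness tests agree
theorem breaks_eq_contains (rows : List (List String)) (width x : Nat) (hx : x < width)
    (H : ∀ i < rows.length, (rows.getD i []).length ≤ x →
          ∃ j < i, (rows.getD j [])[x]? = some "#") :
    pvColBreaksA rows (x : Int) = PySem.Set.contains (pvNonemptyCols rows width) (x : Int) := by
  have hA := pvColBreaksA_iff_ragged rows x H
  have hB := contains_iff rows width x hx
  by_cases hb : ∃ r ∈ rows, r[x]? = some "#"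
  · rw [hA.2 hb, hB.2 hb]
  · rw [Bool.eq_false_iff.2 (fun hc => hb (hA.1 hc)),
        Bool.eq_false_iff.2 (fun hc => hb (hB.1 hc))]

-- A's accumulate-and-append loop equals prefix sums over the 0/1 flag list of its column test
theorem fold_eq_prefix (p : Nat → Bool) (l : List Nat) :
    ∀ (a : Int) (acc : List Int),
      (l.foldl (fun (st : Int × List Int) x =>
          let amount := if p x then st.1 else st.1 + 1
          (amount, st.2 ++ [amount])) (a, acc)).2
      = acc ++ pvPrefixSums a (l.map (fun x => if p x then (0 : Int) else 1)) := by
  induction l with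
  | nil => intro a acc; simp [pvPrefixSums]
  | cons y l ih =>
    intro a acc
    have hy : (if p y then a else a + 1) = a + (if p y then (0 : Int) else 1) := by
      split_ifs <;> omega
    simp only [List.foldl_cons, List.map_cons, pvPrefixSums, hy]
    rw [ih]
    simp

-- ===== VERDICT (by name: the statement is the Claim_ definition above) =====
theorem get_horizontal_expansions_spec : Claim_equal_get_horizontal_expansions := by
  intro u _ hpre
  unfold Spec_get_horizontal_expansions get_horizontal_expansions get_horizontal_expansions_alt
  obtain ⟨hne, hrag⟩ := hpre
  set width := ((PySem.List.pyGet? u 0).getD []).length with hw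
  rw [fold_eq_prefix (fun x => pvColBreaksA u (x : Int)) (List.range width) 0 []]
  simp only [List.nil_append]
  have hflags : (List.range width).map (fun (x : Nat) => if pvColBreaksA u (x : Int) then (0 : Int) else 1)
      = (List.range width).map (fun (x : Nat) => if PySem.Set.contains (pvNonemptyCols u width) (x : Int) then (0 : Int) else 1) :=
    List.map_congr_left (fun x hx => by
      rw [breaks_eq_contains u width x (List.mem_range.1 hx)
        (hrag x (List.mem_range.1 hx))])
  rw [hflags]
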